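-- pv_equiv track=rewrite | github.com/tc1014-201713/Tarea-07-2 | listas.py | hacerprob3
-- ===== SOURCE A (Python) =====
-- def hacerprob3(listauno):
--     vacioluegolleno = []
--
--     if len(listauno) == 0:
--         return vacioluegolleno
--
--     vacioluegolleno = listauno[::1]
--
--     mayor = max(vacioluegolleno)
--     menor = min(vacioluegolleno)
--
--     ceroparamayor = 0
--     ceroparamenor = 0
--
--     for x in range(len(vacioluegolleno)):
--         if vacioluegolleno[x] == mayor:
--             ceroparamayor = x
--         if vacioluegolleno[x] == menor:
--             ceroparamenor = x
--
--     medio = vacioluegolleno[ceroparamayor]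
--
--     vacioluegolleno[ceroparamayor] = vacioluegolleno[ceroparamenor]
--     vacioluegolleno[ceroparamenor] = medio
--
--     return vacioluegolleno
-- ===== SOURCE B (Python) =====
-- def hacerprob3(listauno):
--     if not listauno:
--         return []
--     res = list(listauno)
--     maxval = minval = res[0]
--     maxidx = minidx = 0
--     for i, v in enumerate(res):
--         if v > maxval:
--             maxval = v
--             maxidx = i
--         elif v == maxval:
--             maxidx = i
--         if v < minval:
--             minval = v
--             minidx = i
--         elif v == minval:
--             minidx = i
--     res[maxidx], res[minidx] = res[minidx], res[maxidx]
--     return res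
-- ===== Notes on version B (the rewrite author's own statement) =====
-- stated objective: alternative
-- what changed: A makes three traversals (max(), min(), then an index loop locating their last occurrences) while B makes one fused pass over enumerate(res) maintaining (maxval, maxidx, minval, minidx) with >/== (resp. </==) updates that keep the last occurrence, then performs the same swap.
import Mathlib
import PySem

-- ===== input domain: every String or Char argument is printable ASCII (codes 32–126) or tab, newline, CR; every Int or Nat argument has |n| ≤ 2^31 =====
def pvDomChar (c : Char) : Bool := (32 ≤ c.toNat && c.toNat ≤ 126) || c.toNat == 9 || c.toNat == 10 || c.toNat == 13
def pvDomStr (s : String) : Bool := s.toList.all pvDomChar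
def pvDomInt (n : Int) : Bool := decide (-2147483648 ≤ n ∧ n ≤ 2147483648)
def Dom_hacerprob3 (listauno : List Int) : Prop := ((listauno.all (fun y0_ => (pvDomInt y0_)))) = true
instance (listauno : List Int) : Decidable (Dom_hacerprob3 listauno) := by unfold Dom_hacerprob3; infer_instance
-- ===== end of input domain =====

-- B replaces A's three traversals (max(), min(), index loop) by one fused pass keeping
-- (maxval, maxidx, minval, minidx); same return value, the input list is never mutated by either.

-- ===== PORT A =====
-- literal transliteration of Source A; list indices produced by range(len(..)) are nonnegative and
-- in range, so pyGetD _ _ 0 and .set _.toNat are exact for the Python reads/writes.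
def hacerprob3 (listauno : List Int) : List Int :=
  if listauno.length = 0 then []
  else
    let vacioluegolleno := PySem.List.slice listauno none none   -- listauno[::1], a full copy
    match PySem.List.max? vacioluegolleno (fun y => y),
          PySem.List.min? vacioluegolleno (fun y => y) with
    | some mayor, some menor =>
        let st := (PySem.List.pyRange 0 (vacioluegolleno.length)).foldl
          (fun (st : Int × Int) x =>
            let st1 := if PySem.List.pyGetD vacioluegolleno x 0 = mayor then (x, st.2) else st
            if PySem.List.pyGetD vacioluegolleno x 0 = menor then (st1.1, x) else st1)
          (0, 0)
        let medio := PySem.List.pyGetD vacioluegolleno st.1 0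
        let v1 := vacioluegolleno.set st.1.toNat (PySem.List.pyGetD vacioluegolleno st.2 0)
        v1.set st.2.toNat medio
    | _, _ => []   -- unreachable (max/min of a nonempty list always return); needed for totality

-- ===== PORT B =====
-- literal transliteration of Source B: one fused pass over enumerate(res) maintaining
-- (maxval, maxidx, minval, minidx), then the simultaneous swap.
def hacerprob3_alt (listauno : List Int) : List Int :=
  match listauno with
  | [] => []
  | h :: _ =>
    let res := listauno   -- list(listauno); Lean lists are immutable so the copy is the list itself
    let st := (PySem.List.enumerate res).foldl
      (fun (st : Int × Int × Int × Int) p =>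
        let (maxval, maxidx, minval, minidx) := st
        let (maxval, maxidx) :=
          if p.2 > maxval then (p.2, p.1)
          else if p.2 = maxval then (maxval, p.1)
          else (maxval, maxidx)
        let (minval, minidx) :=
          if p.2 < minval then (p.2, p.1)
          else if p.2 = minval then (minval, p.1)
          else (minval, minidx)
        (maxval, maxidx, minval, minidx))
      (h, 0, h, 0)
    let a := PySem.List.pyGetD res st.2.2.2 0      -- res[minidx]
    let b := PySem.List.pyGetD res st.2.1 0        -- res[maxidx]
    (res.set st.2.1.toNat a).set st.2.2.2.toNat b  -- res[maxidx], res[minidx] = res[minidx], res[maxidx]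

-- ===== PRECONDITION & SPEC =====
def Spec_hacerprob3 (listauno : List Int) (out : List Int) : Prop := out = hacerprob3_alt listauno
instance (listauno : List Int) (out : List Int) : Decidable (Spec_hacerprob3 listauno out) := by unfold Spec_hacerprob3; infer_instance

-- ===== CLAIM (what is proved, stated in full; the proofs are below) =====
def Claim_equal_hacerprob3 : Prop := ∀ (listauno : List Int), Dom_hacerprob3 listauno → Spec_hacerprob3 listauno (hacerprob3 listauno)

-- ===== LEMMAS AND PROOFS =====

-- Python's max/min picking rule as a binary operation
def pmax (m x : Int) : Int := if m < x then x else m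
def pmin (m x : Int) : Int := if x < m then x else m

-- last index carrying value c in an (index, value) list, default d
def lastIdx (c : Int) (zs : List (Int × Int)) (d : Int) : Int :=
  zs.foldl (fun a p => if p.2 = c then p.1 else a) d

theorem max?_cons (h : Int) (t : List Int) :
    PySem.List.max? (h :: t) (fun y => y) = some (t.foldl pmax h) := by
  show List.foldl _ (some h) t = _
  induction t generalizing h with
  | nil => rfl
  | cons x t ih => simpa [pmax, ← apply_ite some] using ih (pmax h x)

theorem min?_cons (h : Int) (t : List Int) :
    PySem.List.min? (h :: t) (fun y => y) = some (t.foldl pmin h) := by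
  show List.foldl _ (some h) t = _
  induction t generalizing h with
  | nil => rfl
  | cons x t ih => simpa [pmin, ← apply_ite some] using ih (pmin h x)

theorem enumerate_eq_map_range (l : List Int) (s : Int) :
    PySem.List.enumerate l s
      = (List.range l.length).map (fun k : Nat => (s + (k : Int), l.getD k 0)) := by
  induction l generalizing s with
  | nil => rfl
  | cons h t ih =>
    simp only [PySem.List.enumerate, List.length_cons, List.range_succ_eq_map,
      List.map_cons, List.map_map, List.getD_cons_zero, Nat.cast_zero, add_zero,
      List.cons.injEq, true_and]
    rw [ih (s + 1)]
    apply List.map_congr_left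
    intro k _
    simp only [Function.comp_apply, List.getD_cons_succ, Prod.mk.injEq]
    exact ⟨by push_cast; ring, trivial⟩

theorem foldl_range_eq_enum {σ : Type} (l : List Int) (f : σ → Int × Int → σ) (init : σ) :
    (PySem.List.pyRange 0 (l.length : Int)).foldl
        (fun st x => f st (x, PySem.List.pyGetD l x 0)) init
      = (PySem.List.enumerate l 0).foldl f init := by
  rw [show ((l.length : Int)) = ((l.length : Nat) : Int) from rfl,
      PySem.List.pyRange_zero_natCast, List.foldl_map,
      enumerate_eq_map_range l 0, List.foldl_map]
  apply PySem.List.foldl_congr_mem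
  intro acc k _
  simp [PySem.List.pyGetD_natCast]

theorem lastIdx_append (c : Int) (zs : List (Int × Int)) (p : Int × Int) (d : Int) :
    lastIdx c (zs ++ [p]) d = if p.2 = c then p.1 else lastIdx c zs d := by
  simp [lastIdx, List.foldl_append]

-- characterization of A's locating loop over the enumerated list
theorem a_fold_char (mayor menor : Int) (zs : List (Int × Int)) :
    ∀ (a b : Int),
      zs.foldl
          (fun (st : Int × Int) p =>
            if p.2 = menor then ((if p.2 = mayor then (p.1, st.2) else st).1, p.1)
            else if p.2 = mayor then (p.1, st.2) else st)
          (a, b)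
        = (lastIdx mayor zs a, lastIdx menor zs b) := by
  induction zs using List.reverseRecOn with
  | nil => intro a b; simp [lastIdx]
  | append_singleton zs p ih =>
    intro a b
    rw [List.foldl_append, ih a b]
    simp only [List.foldl_cons, List.foldl_nil, lastIdx_append]
    by_cases h1 : p.2 = mayor <;> by_cases h2 : p.2 = menor
    · simp only [if_pos h1, if_pos h2]
    · simp only [if_pos h1, if_neg h2]
    · simp only [if_neg h1, if_pos h2]
    · simp only [if_neg h1, if_neg h2]

theorem step_max (M I : Int) (p : Int × Int) :
    (if p.2 > M then (p.2, p.1) else if p.2 = M then (M, p.1) else (M, I))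
      = (pmax M p.2, if p.2 = pmax M p.2 then p.1 else I) := by
  unfold pmax
  split_ifs <;> first | rfl | omega

theorem step_min (m J : Int) (p : Int × Int) :
    (if p.2 < m then (p.2, p.1) else if p.2 = m then (m, p.1) else (m, J))
      = (pmin m p.2, if p.2 = pmin m p.2 then p.1 else J) := by
  unfold pmin
  split_ifs <;> first | rfl | omega

theorem pmax_stay (M x : Int) (h : ¬ x = pmax M x) : pmax M x = M := by
  unfold pmax at *; split_ifs at h ⊢ <;> simp_all

theorem pmin_stay (m x : Int) (h : ¬ x = pmin m x) : pmin m x = m := by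
  unfold pmin at *; split_ifs at h ⊢ <;> simp_all

-- characterization of B's fused pass
theorem b_fold_char (zs : List (Int × Int)) :
    ∀ (mv mi nv ni : Int),
      zs.foldl
          (fun (st : Int × Int × Int × Int) p =>
            ((if p.2 > st.1 then (p.2, p.1) else if p.2 = st.1 then (st.1, p.1) else (st.1, st.2.1)).1,
             (if p.2 > st.1 then (p.2, p.1) else if p.2 = st.1 then (st.1, p.1) else (st.1, st.2.1)).2,
             (if p.2 < st.2.2.1 then (p.2, p.1) else if p.2 = st.2.2.1 then (st.2.2.1, p.1) else (st.2.2.1, st.2.2.2)).1,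
             (if p.2 < st.2.2.1 then (p.2, p.1) else if p.2 = st.2.2.1 then (st.2.2.1, p.1) else (st.2.2.1, st.2.2.2)).2))
          (mv, mi, nv, ni)
        = ((zs.map Prod.snd).foldl pmax mv,
           lastIdx ((zs.map Prod.snd).foldl pmax mv) zs mi,
           (zs.map Prod.snd).foldl pmin nv,
           lastIdx ((zs.map Prod.snd).foldl pmin nv) zs ni) := by
  induction zs using List.reverseRecOn with
  | nil => intro mv mi nv ni; simp [lastIdx]
  | append_singleton zs p ih =>
    intro mv mi nv ni
    rw [List.foldl_append, ih mv mi nv ni]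
    simp only [List.foldl_cons, List.foldl_nil, List.map_append, List.foldl_append,
      List.map_cons, List.map_nil, lastIdx_append]
    rw [step_max ((zs.map Prod.snd).foldl pmax mv) (lastIdx ((zs.map Prod.snd).foldl pmax mv) zs mi) p,
        step_min ((zs.map Prod.snd).foldl pmin nv) (lastIdx ((zs.map Prod.snd).foldl pmin nv) zs ni) p]
    dsimp only
    refine congrArg₂ Prod.mk rfl (congrArg₂ Prod.mk ?_ (congrArg₂ Prod.mk rfl ?_))
    · by_cases hc : p.2 = pmax ((zs.map Prod.snd).foldl pmax mv) p.2
      · simp only [if_pos hc]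
      · simp only [pmax_stay _ _ hc]
    · by_cases hc : p.2 = pmin ((zs.map Prod.snd).foldl pmin nv) p.2
      · simp only [if_pos hc]
      · simp only [pmin_stay _ _ hc]

theorem pmax_self (h : Int) : pmax h h = h := by simp [pmax]
theorem pmin_self (h : Int) : pmin h h = h := by simp [pmin]

-- A's index loop, stated in the form the unfolded port takes
theorem a_loop (l : List Int) (mayor menor : Int) :
    List.foldl
        (fun (st : Int × Int) x =>
          if PySem.List.pyGetD l x 0 = menor then
            ((if PySem.List.pyGetD l x 0 = mayor then (x, st.2) else st).1, x)
          else if PySem.List.pyGetD l x 0 = mayor then (x, st.2) else st)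
        (0, 0) (PySem.List.pyRange 0 (l.length : Int))
      = (lastIdx mayor (PySem.List.enumerate l) 0, lastIdx menor (PySem.List.enumerate l) 0) :=
  (foldl_range_eq_enum l
      (fun (st : Int × Int) p =>
        if p.2 = menor then ((if p.2 = mayor then (p.1, st.2) else st).1, p.1)
        else if p.2 = mayor then (p.1, st.2) else st)
      ((0 : Int), (0 : Int))).trans
    (a_fold_char mayor menor (PySem.List.enumerate l) 0 0)

-- ===== VERDICT (by name: the statement is the Claim_ definition above) =====
theorem hacerprob3_spec : Claim_equal_hacerprob3 := by
  intro listauno _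
  unfold Spec_hacerprob3
  cases listauno with
  | nil => rfl
  | cons h t =>
    unfold hacerprob3 hacerprob3_alt
    rw [if_neg (by simp)]
    rw [show PySem.List.slice (h :: t) none none = h :: t by simp [pysem]]
    dsimp only
    rw [max?_cons, min?_cons]
    dsimp only
    rw [a_loop (h :: t) (t.foldl pmax h) (t.foldl pmin h),
        b_fold_char (PySem.List.enumerate (h :: t)) h 0 h 0]
    have hsnd : (PySem.List.enumerate (h :: t)).map Prod.snd = h :: t :=
      PySem.List.map_snd_enumerate (h :: t) 0
    have hmax : ((PySem.List.enumerate (h :: t)).map Prod.snd).foldl pmax h = t.foldl pmax h := by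
      rw [hsnd]; simp [pmax_self]
    have hmin : ((PySem.List.enumerate (h :: t)).map Prod.snd).foldl pmin h = t.foldl pmin h := by
      rw [hsnd]; simp [pmin_self]
    rw [hmax, hmin]
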